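-- pv_equiv track=rewrite | github.com/LahElr/my-small-tools | DirMerger.py | decide_i_for_same_names
-- ===== SOURCE A (Python) =====
-- def decide_i_for_same_names(filename: str, lss: list, lsd: list):
--     '''
--     This function find a proper number to be in the prefix of the new name if a renaming is needed when detecting same-name/same file in src and dst
--     '''
--     for i in range(65536):
--         if i >= 65535:
--             raise RuntimeError(
--                 "too many iters of a same-name-file.")
--         nn = "src{}_{}".format(i, filename)
--         if nn not in lss and nn not in lsd:
--             return i
-- ===== SOURCE B (Python) =====
-- def decide_i_for_same_names(filename: str, lss: list, lsd: list):
--     '''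
--     Collect every index already taken by a name of the exact form
--     "src<i>_<filename>" (canonical decimal, no leading zeros), then
--     return the smallest free index.
--     '''
--     suffix = "_" + filename
--     used = set()
--     for name in lss + lsd:
--         if name.startswith("src") and name.endswith(suffix):
--             mid = name[3:len(name) - len(suffix)]
--             if mid.isdigit():
--                 v = int(mid)
--                 if str(v) == mid:
--                     used.add(v)
--     i = 0
--     while i in used:
--         i += 1
--     if i >= 65535:
--         raise RuntimeError("too many iters of a same-name-file.")
--     return i
-- ===== Notes on version B (the rewrite author's own statement) =====
-- stated objective: alternative
-- what changed: Instead of probing each candidate name 'src{i}_{filename}' against both lists for i = 0, 1, 2, ..., B makes one parsing pass over lss + lsd collecting the set of indices already taken by names of the exact form 'src<i>_<filename>' (canonical decimal), then returns the smallest index not in that set.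
import Mathlib
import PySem

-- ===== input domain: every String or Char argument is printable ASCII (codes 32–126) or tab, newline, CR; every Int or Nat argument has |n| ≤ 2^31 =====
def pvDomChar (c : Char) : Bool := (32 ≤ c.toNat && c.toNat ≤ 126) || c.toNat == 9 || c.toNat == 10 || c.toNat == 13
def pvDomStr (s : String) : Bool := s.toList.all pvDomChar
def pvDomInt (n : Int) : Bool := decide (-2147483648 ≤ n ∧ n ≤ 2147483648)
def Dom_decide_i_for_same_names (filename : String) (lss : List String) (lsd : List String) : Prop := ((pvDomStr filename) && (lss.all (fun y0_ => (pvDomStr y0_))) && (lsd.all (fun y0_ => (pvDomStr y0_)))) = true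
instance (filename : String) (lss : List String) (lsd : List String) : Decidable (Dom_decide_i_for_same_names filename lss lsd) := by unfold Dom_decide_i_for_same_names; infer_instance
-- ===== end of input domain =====

-- B replaces A's probe-each-candidate-name-against-both-lists loop by a single parsing pass that
-- collects the set of already-taken indices and then returns the smallest free one (objective:
-- alternative algorithm). Equivalence is proved on Pre_, the inputs where A returns (no RuntimeError).

-- ===== PORT A =====
-- "src{}_{}".format(i, filename)  (strings kept as List Char: Lean's own String.append is kernel-opaque)
def pvName (fl : List Char) (i : Int) : List Char := ['s', 'r', 'c'] ++ PySem.Int.toChars i ++ '_' :: fl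

-- A's 'for i in range(65536)' loop; fuel = remaining iterations; -1 stands for the RuntimeError
-- raised at i = 65535 (excluded by Pre_); fuel 0 is never reached (65536 iterations cover i = 0..65535)
def pvLoopA (lssL lsdL : List (List Char)) (fl : List Char) : Nat → Nat → Int
  | 0, _ => -1
  | fuel + 1, i =>
    if 65535 ≤ i then -1
    else
      let nn := pvName fl (i : Int)
      if !(lssL.contains nn) && !(lsdL.contains nn) then (i : Int)
      else pvLoopA lssL lsdL fl fuel (i + 1)

def decide_i_for_same_names (filename : String) (lss : List String) (lsd : List String) : Int :=
  pvLoopA (lss.map String.toList) (lsd.map String.toList) filename.toList 65536 0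

-- ===== PORT B =====
-- int(mid) for the all-digit string mid (guaranteed by B's isdigit() guard): exact there
def pvDigitsVal (cs : List Char) : Nat := cs.foldl (fun a c => a * 10 + (c.toNat - 48)) 0

-- the body after the startswith/endswith test: mid.isdigit() and str(int(mid)) == mid
def pvParseMid (mid : List Char) : Option Int :=
  if PySem.Chars.strIsdigit mid then
    if PySem.Int.toChars ((pvDigitsVal mid : Nat) : Int) == mid then some ((pvDigitsVal mid : Nat) : Int)
    else none
  else none

-- one name: does it have the exact form "src<v>_<filename>" (canonical decimal)? then some v
def pvParse (suf name : List Char) : Option Int :=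
  if PySem.Chars.startswith name ['s', 'r', 'c'] && PySem.Chars.endswith name suf then
    pvParseMid (PySem.Chars.slice name (some 3) (some ((name.length : Int) - (suf.length : Int))))
  else none

-- 'for name in lss + lsd: … used.add(v)'
def pvUsed (suf : List Char) (names : List (List Char)) : PySem.Set Int :=
  names.foldl (fun s n => match pvParse suf n with | some v => PySem.Set.add s v | none => s) PySem.Set.empty

-- 'i = 0; while i in used: i += 1' — fuel |used| + 1 suffices: the smallest free i is ≤ |used|
def pvFirstFree (used : List Int) : Nat → Nat → Nat
  | 0, i => i
  | fuel + 1, i => if used.contains (i : Int) then pvFirstFree used fuel (i + 1) else i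

def decide_i_for_same_names_alt (filename : String) (lss : List String) (lsd : List String) : Int :=
  let suf := '_' :: filename.toList
  let used := pvUsed suf (lss.map String.toList ++ lsd.map String.toList)
  let i := pvFirstFree used (used.length + 1) 0
  -- 'if i >= 65535: raise RuntimeError' — -1 stands for the raise (excluded by Pre_)
  if 65535 ≤ i then -1 else (i : Int)

-- ===== PRECONDITION & SPEC =====
-- Pre_: exactly the inputs on which A returns (some candidate index below 65535 is free). The bound
-- 'i ≤ |lss| + |lsd|' does not narrow it — the smallest free index never exceeds the number of names,
-- by pigeonhole (each smaller index needs a distinct name in the lists) — it only keeps the condition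
-- cheaply checkable.
def Pre_decide_i_for_same_names (filename : String) (lss : List String) (lsd : List String) : Prop :=
  ∃ i : Nat, i ≤ lss.length + lsd.length ∧ i < 65535 ∧
    pvName filename.toList (i : Int) ∉ lss.map String.toList ∧
    pvName filename.toList (i : Int) ∉ lsd.map String.toList

instance (filename : String) (lss : List String) (lsd : List String) : Decidable (Pre_decide_i_for_same_names filename lss lsd) := by unfold Pre_decide_i_for_same_names; infer_instance

def pvWitness_decide_i_for_same_names : String × List String × List String := ("a", ["src0_a", "b"], ["src1_a"])

def Spec_decide_i_for_same_names (filename : String) (lss : List String) (lsd : List String) (out : Int) : Prop := out = decide_i_for_same_names_alt filename lss lsd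
instance (filename : String) (lss : List String) (lsd : List String) (out : Int) : Decidable (Spec_decide_i_for_same_names filename lss lsd out) := by unfold Spec_decide_i_for_same_names; infer_instance

-- ===== CLAIM (what is proved, stated in full; the proofs are below) =====
def Claim_equal_decide_i_for_same_names : Prop := ∀ (filename : String) (lss : List String) (lsd : List String), Dom_decide_i_for_same_names filename lss lsd → Pre_decide_i_for_same_names filename lss lsd → Spec_decide_i_for_same_names filename lss lsd (decide_i_for_same_names filename lss lsd)

-- ===== LEMMAS AND PROOFS =====

theorem pv_witness_ok :
    Dom_decide_i_for_same_names pvWitness_decide_i_for_same_names.1 pvWitness_decide_i_for_same_names.2.1 pvWitness_decide_i_for_same_names.2.2 ∧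
    Pre_decide_i_for_same_names pvWitness_decide_i_for_same_names.1 pvWitness_decide_i_for_same_names.2.1 pvWitness_decide_i_for_same_names.2.2 := by
  constructor <;> decide

-- str(i) for a natural i, built back-to-front (the shape Nat.toDigitsCore produces)
def repNat (n : Nat) : List Char :=
  if h : n / 10 = 0 then [Nat.digitChar (n % 10)]
  else repNat (n / 10) ++ [Nat.digitChar (n % 10)]
decreasing_by exact Nat.div_lt_self (Nat.pos_of_ne_zero (by omega)) (by omega)

theorem toDigitsCore_eq (fuel : Nat) : ∀ (n : Nat) (ds : List Char), n < fuel →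
    Nat.toDigitsCore 10 fuel n ds = repNat n ++ ds := by
  induction fuel with
  | zero => intro n ds h; omega
  | succ f ih =>
    intro n ds h
    rw [Nat.toDigitsCore, repNat]
    by_cases h10 : n / 10 = 0
    · simp [h10]
    · simp only [h10, if_false]
      rw [ih (n / 10) _ (by omega)]
      simp

theorem toChars_natCast (i : Nat) : PySem.Int.toChars (i : Int) = repNat i := by
  rw [PySem.Int.toChars]
  rw [if_neg (by omega)]
  have : ((i : Int)).toNat = i := rfl
  rw [this, Nat.toDigits, toDigitsCore_eq (i + 1) i [] (by omega)]
  simp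

theorem digitChar_isdigit {d : Nat} (h : d < 10) : PySem.Chars.isdigit (Nat.digitChar d) = true := by
  interval_cases d <;> decide

theorem digitChar_val {d : Nat} (h : d < 10) : (Nat.digitChar d).toNat - 48 = d := by
  interval_cases d <;> decide

theorem repNat_digits (n : Nat) : ∀ c ∈ repNat n, PySem.Chars.isdigit c = true := by
  induction n using repNat.induct with
  | case1 n h =>
    intro c hc; rw [repNat, dif_pos h] at hc; simp at hc; subst hc
    exact digitChar_isdigit (Nat.mod_lt _ (by omega))
  | case2 n h ih =>
    intro c hc; rw [repNat, dif_neg h] at hc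
    rcases List.mem_append.mp hc with h1 | h2
    · exact ih c h1
    · simp at h2; subst h2; exact digitChar_isdigit (Nat.mod_lt _ (by omega))

theorem repNat_ne_nil (n : Nat) : repNat n ≠ [] := by
  rw [repNat]; split <;> simp

theorem pvDigitsVal_repNat (n : Nat) : pvDigitsVal (repNat n) = n := by
  induction n using repNat.induct with
  | case1 n h =>
    rw [repNat, dif_pos h]
    simp [pvDigitsVal, digitChar_val (Nat.mod_lt n (by omega))]
    omega
  | case2 n h ih =>
    rw [repNat, dif_neg h]
    unfold pvDigitsVal at *
    rw [List.foldl_append, ih]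
    simp [digitChar_val (Nat.mod_lt n (by omega))]
    omega

-- the slice name[3 : len(name) - len(suffix)] on a name of the shape src ++ mid ++ suffix is mid
theorem pv_slice_mid (mid suf : List Char) :
    PySem.Chars.slice (['s','r','c'] ++ mid ++ suf) (some 3)
      (some (((['s','r','c'] ++ mid ++ suf).length : Int) - (suf.length : Int))) = mid := by
  have hlen : (['s','r','c'] ++ mid ++ suf).length = 3 + mid.length + suf.length := by simp; omega
  rw [hlen]
  have : ((3 + mid.length + suf.length : Nat) : Int) - (suf.length : Int) = ((3 + mid.length : Nat) : Int) := by
    push_cast; ring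
  rw [this]
  rw [PySem.Chars.slice_eq_listSlice, PySem.List.slice_toNat _ (by omega) (by omega)]
  have h3 : ((3 : Int)).toNat = 3 := rfl
  have h2 : (((3 + mid.length : Nat) : Int)).toNat = 3 + mid.length := rfl
  rw [h3, h2]
  have : (['s','r','c'] ++ mid ++ suf).drop 3 = mid ++ suf := by
    simp [List.drop_append]
  rw [this]
  have : 3 + mid.length - 3 = mid.length := by omega
  rw [this, List.take_left' rfl]

-- B's parser accepts exactly A's candidate names: it maps "src<i>_<filename>" to i …
theorem pv_parse_name (fl : List Char) (i : Nat) :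
    pvParse ('_' :: fl) (pvName fl (i : Int)) = some (i : Int) := by
  have hname : pvName fl (i : Int) = ['s','r','c'] ++ repNat i ++ ('_' :: fl) := by
    rw [pvName, toChars_natCast]
  rw [pvParse, hname, if_pos, pv_slice_mid, pvParseMid, if_pos, pvDigitsVal_repNat,
      toChars_natCast, if_pos (by simp)]
  · rw [PySem.Chars.strIsdigit]
    simp only [Bool.and_eq_true, List.all_eq_true]
    exact ⟨by simp [repNat_ne_nil i], fun c hc => repNat_digits i c hc⟩
  · rw [Bool.and_eq_true, PySem.Chars.startswith_iff, PySem.Chars.endswith_iff]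
    exact ⟨⟨repNat i ++ '_' :: fl, by simp⟩, ⟨['s','r','c'] ++ repNat i, by simp⟩⟩

-- … and any name it accepts with value v IS the candidate name for v
theorem pv_parse_inv {fl name : List Char} {v : Int} (h : pvParse ('_' :: fl) name = some v) :
    name = pvName fl v := by
  rw [pvParse] at h
  by_cases hc : (PySem.Chars.startswith name ['s','r','c'] && PySem.Chars.endswith name ('_' :: fl)) = true
  swap
  · rw [if_neg hc] at h; exact absurd h (by simp)
  rw [if_pos hc] at h
  rw [Bool.and_eq_true, PySem.Chars.startswith_iff, PySem.Chars.endswith_iff] at hc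
  obtain ⟨⟨rest, hrest⟩, ⟨pre, hpre⟩⟩ := hc
  -- the suffix "_…" cannot reach into "src" ('_' is none of 's','r','c'), so pre = "src" ++ mid
  obtain ⟨mid, hmid⟩ : ∃ mid, pre = ['s','r','c'] ++ mid := by
    match pre, hpre with
    | [], hpre => rw [← hrest] at hpre; simp at hpre
    | [a], hpre => rw [← hrest] at hpre; simp at hpre
    | [a,b], hpre => rw [← hrest] at hpre; simp at hpre
    | a::b::c::mid, hpre =>
        rw [← hrest] at hpre; simp at hpre
        exact ⟨mid, by simp [hpre.1, hpre.2.1, hpre.2.2.1]⟩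
  rw [hmid, List.append_assoc] at hpre
  rw [← hpre, ← List.append_assoc] at h ⊢
  rw [pv_slice_mid, pvParseMid] at h
  by_cases hd : PySem.Chars.strIsdigit mid = true
  swap
  · rw [if_neg hd] at h; exact absurd h (by simp)
  rw [if_pos hd] at h
  by_cases he : (PySem.Int.toChars ((pvDigitsVal mid : Nat) : Int) == mid) = true
  swap
  · rw [if_neg he] at h; exact absurd h (by simp)
  rw [if_pos he] at h
  simp only [Option.some.injEq] at h
  rw [beq_iff_eq] at he
  rw [pvName, ← h, he]

theorem pvUsed_go_mem (suf : List Char) (names : List (List Char)) (s : PySem.Set Int) (v : Int) :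
    v ∈ names.foldl (fun s n => match pvParse suf n with | some v => PySem.Set.add s v | none => s) s ↔
      v ∈ s ∨ ∃ n ∈ names, pvParse suf n = some v := by
  induction names generalizing s with
  | nil => simp
  | cons a t ih =>
    simp only [List.foldl_cons, ih, List.mem_cons]
    cases h : pvParse suf a with
    | none =>
      constructor
      · rintro (hs | ⟨n, hn, hp⟩)
        · exact Or.inl hs
        · exact Or.inr ⟨n, Or.inr hn, hp⟩
      · rintro (hs | ⟨n, (rfl | hn), hp⟩)
        · exact Or.inl hs
        · rw [h] at hp; cases hp
        · exact Or.inr ⟨n, hn, hp⟩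
    | some w =>
      rw [PySem.Set.mem_add]
      constructor
      · rintro ((hs | rfl) | ⟨n, hn, hp⟩)
        · exact Or.inl hs
        · exact Or.inr ⟨a, Or.inl rfl, h⟩
        · exact Or.inr ⟨n, Or.inr hn, hp⟩
      · rintro (hs | ⟨n, (rfl | hn), hp⟩)
        · exact Or.inl (Or.inl hs)
        · rw [h] at hp; cases hp; exact Or.inl (Or.inr rfl)
        · exact Or.inr ⟨n, hn, hp⟩

theorem pvUsed_mem (suf : List Char) (names : List (List Char)) (v : Int) :
    v ∈ pvUsed suf names ↔ ∃ n ∈ names, pvParse suf n = some v := by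
  rw [pvUsed, pvUsed_go_mem]; simp [PySem.Set.empty]

-- A's loop returns the smallest free index j (when j < 65535)
theorem pvLoopA_eq (lssL lsdL : List (List Char)) (fl : List Char) (j : Nat)
    (hj : j < 65535)
    (hfree : pvName fl (j : Int) ∉ lssL ∧ pvName fl (j : Int) ∉ lsdL)
    (hmin : ∀ k < j, pvName fl (k : Int) ∈ lssL ∨ pvName fl (k : Int) ∈ lsdL) :
    ∀ fuel i, i ≤ j → j - i < fuel → pvLoopA lssL lsdL fl fuel i = (j : Int) := by
  intro fuel
  induction fuel with
  | zero => intro i h1 h2; omega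
  | succ f ih =>
    intro i h1 h2
    rw [pvLoopA]
    rw [if_neg (by omega)]
    by_cases hij : i = j
    · subst hij
      rw [if_pos (by simp [hfree.1, hfree.2])]
    · have hi : pvName fl (i : Int) ∈ lssL ∨ pvName fl (i : Int) ∈ lsdL := hmin i (by omega)
      rw [if_neg (by rcases hi with h | h <;> simp [h])]
      exact ih (i + 1) (by omega) (by omega)

-- B's while loop returns the smallest i outside used
theorem pvFirstFree_eq (used : List Int) (j : Nat)
    (hfree : (j : Int) ∉ used)
    (hmin : ∀ k < j, (k : Int) ∈ used) :
    ∀ fuel i, i ≤ j → j - i < fuel → pvFirstFree used fuel i = j := by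
  intro fuel
  induction fuel with
  | zero => intro i h1 h2; omega
  | succ f ih =>
    intro i h1 h2
    rw [pvFirstFree]
    by_cases hij : i = j
    · subst hij; rw [if_neg (by simp [hfree])]
    · rw [if_pos (by simp [hmin i (by omega)])]
      exact ih (i + 1) (by omega) (by omega)

theorem pv_main (filename : String) (lss : List String) (lsd : List String)
    (hpre : Pre_decide_i_for_same_names filename lss lsd) :
    decide_i_for_same_names filename lss lsd = decide_i_for_same_names_alt filename lss lsd := by
  obtain ⟨i0, hi0le, hi0lt, hi0⟩ := hpre
  set fl := filename.toList with hfl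
  set lssL := lss.map String.toList with hlss
  set lsdL := lsd.map String.toList with hlsd
  set used := pvUsed ('_' :: fl) (lssL ++ lsdL) with hused
  have hex : ∃ k : Nat, pvName fl (k : Int) ∉ lssL ∧ pvName fl (k : Int) ∉ lsdL := ⟨i0, hi0⟩
  set j := Nat.find hex with hj
  have hjle : j ≤ i0 := Nat.find_min' hex hi0
  have hjlt : j < 65535 := by omega
  have hfree := Nat.find_spec hex
  have hmin : ∀ k < j, pvName fl (k : Int) ∈ lssL ∨ pvName fl (k : Int) ∈ lsdL := by
    intro k hk
    have := Nat.find_min hex hk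
    by_cases h1 : pvName fl (k : Int) ∈ lssL
    · exact Or.inl h1
    · exact Or.inr (by tauto)
  have hiff : ∀ k : Nat, (k : Int) ∈ used ↔ (pvName fl (k : Int) ∈ lssL ∨ pvName fl (k : Int) ∈ lsdL) := by
    intro k
    rw [hused, pvUsed_mem]
    constructor
    · rintro ⟨n, hn, hp⟩
      have := pv_parse_inv hp
      subst this
      rcases List.mem_append.mp hn with h | h
      · exact Or.inl h
      · exact Or.inr h
    · intro h
      exact ⟨pvName fl (k : Int), List.mem_append.mpr (by tauto), pv_parse_name fl k⟩
  have husedfree : (j : Int) ∉ used := by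
    rw [hiff j]; tauto
  have husedmin : ∀ k < j, (k : Int) ∈ used := fun k hk => (hiff k).mpr (hmin k hk)
  have hjlen : j ≤ used.length := by
    have hsub : (List.range j).map (Nat.cast : Nat → Int) ⊆ used := by
      intro x hx
      obtain ⟨k, hk, rfl⟩ := List.mem_map.mp hx
      exact husedmin k (List.mem_range.mp hk)
    have hnd : ((List.range j).map (Nat.cast : Nat → Int)).Nodup :=
      List.Nodup.map (fun a b h => by exact_mod_cast h) List.nodup_range
    calc j = ((List.range j).map (Nat.cast : Nat → Int)).length := by simp
      _ = ((List.range j).map (Nat.cast : Nat → Int)).toFinset.card := (List.toFinset_card_of_nodup hnd).symm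
      _ ≤ used.toFinset.card := Finset.card_le_card (by intro x hx; simp only [List.mem_toFinset] at *; exact hsub hx)
      _ ≤ used.length := used.toFinset_card_le
  have hA : decide_i_for_same_names filename lss lsd = (j : Int) := by
    rw [decide_i_for_same_names]
    exact pvLoopA_eq lssL lsdL fl j hjlt hfree hmin 65536 0 (by omega) (by omega)
  have hB : decide_i_for_same_names_alt filename lss lsd = (j : Int) := by
    rw [decide_i_for_same_names_alt]
    rw [pvFirstFree_eq used j husedfree husedmin (used.length + 1) 0 (by omega) (by omega)]
    rw [if_neg (by omega)]
  rw [hA, hB]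

-- ===== VERDICT (by name: the statement is the Claim_ definition above) =====
theorem decide_i_for_same_names_spec : Claim_equal_decide_i_for_same_names := by
  intro filename lss lsd _ hpre
  exact pv_main filename lss lsd hpre
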